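-- pv_equiv track=rewrite | github.com/mahdi67436/discord_security_bot | security_bot/utils/filters.py | leetspeak_normalize
-- ===== SOURCE A (Python) =====
-- def leetspeak_normalize(text: str) -> str:
--     """Convert common leetspeak patterns."""
--     replacements = {
--         '@': 'a', '4': 'a', '1': 'i', '3': 'e', '0': 'o',
--         '5': 's', '7': 't', '8': 'b', '6': 'g', '!': 'i',
--         '$': 's', '2': 'z', '9': 'g', '|': 'i',
--     }
--     for char, replacement in replacements.items():
--         text = text.replace(char, replacement)
--     return text.lower()
-- ===== SOURCE B (Python) =====
-- def _leet_char(ch):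
--     if ch == '@' or ch == '4':
--         return 'a'
--     elif ch == '1' or ch == '!' or ch == '|':
--         return 'i'
--     elif ch == '3':
--         return 'e'
--     elif ch == '0':
--         return 'o'
--     elif ch == '5' or ch == '$':
--         return 's'
--     elif ch == '7':
--         return 't'
--     elif ch == '8':
--         return 'b'
--     elif ch == '6' or ch == '9':
--         return 'g'
--     elif ch == '2':
--         return 'z'
--     else:
--         return ch
--
--
-- def leetspeak_normalize(text: str) -> str:
--     """Convert common leetspeak patterns."""
--     out = []
--     for ch in text:
--         out.append(_leet_char(ch).lower())
--     return ''.join(out)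
-- ===== Notes on version B (the rewrite author's own statement) =====
-- stated objective: simpler
-- what changed: A rewrites the whole string once per leetspeak key (14 full replace passes, then one lower pass); B makes a single accumulator loop over the characters, mapping each through an explicit conditional helper (no dict) and lowercasing it immediately, joining once.
import Mathlib
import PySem

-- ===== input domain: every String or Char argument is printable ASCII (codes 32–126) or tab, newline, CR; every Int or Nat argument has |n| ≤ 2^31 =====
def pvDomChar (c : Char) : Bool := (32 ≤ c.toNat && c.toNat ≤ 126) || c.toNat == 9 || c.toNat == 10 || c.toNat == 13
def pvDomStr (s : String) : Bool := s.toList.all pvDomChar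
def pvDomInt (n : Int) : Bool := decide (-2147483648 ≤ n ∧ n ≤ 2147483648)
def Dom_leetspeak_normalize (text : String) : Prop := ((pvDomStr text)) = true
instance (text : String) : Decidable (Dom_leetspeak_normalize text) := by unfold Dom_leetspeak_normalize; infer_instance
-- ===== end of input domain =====

-- B replaces A's 14 full-string replace passes (then a lower pass) by one accumulator loop
-- that maps each character through an explicit conditional helper and lowercases it at once:
-- simpler single-pass formulation, same result.


-- ===== PORT A =====
-- the dict literal `replacements` of A (insertion order; distinct keys)
def pvReplacements : List (Char × Char) :=
  [('@', 'a'), ('4', 'a'), ('1', 'i'), ('3', 'e'), ('0', 'o'),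
   ('5', 's'), ('7', 't'), ('8', 'b'), ('6', 'g'), ('!', 'i'),
   ('$', 's'), ('2', 'z'), ('9', 'g'), ('|', 'i')]

-- for char, replacement in replacements.items(): text = text.replace(char, replacement); return text.lower()
def leetspeak_normalize (text : String) : String :=
  PySem.Str.lower
    (pvReplacements.foldl
      (fun t cr => PySem.Str.replace t (String.ofList [cr.1]) (String.ofList [cr.2])) text)

-- ===== PORT B =====
-- _leet_char: explicit if/elif chain, no dict
def pvLeetChar (ch : Char) : Char :=
  if ch = '@' ∨ ch = '4' then 'a'
  else if ch = '1' ∨ ch = '!' ∨ ch = '|' then 'i'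
  else if ch = '3' then 'e'
  else if ch = '0' then 'o'
  else if ch = '5' ∨ ch = '$' then 's'
  else if ch = '7' then 't'
  else if ch = '8' then 'b'
  else if ch = '6' ∨ ch = '9' then 'g'
  else if ch = '2' then 'z'
  else ch

-- out = []; for ch in text: out.append(_leet_char(ch).lower()); return ''.join(out)
def leetspeak_normalize_alt (text : String) : String :=
  String.ofList
    (text.toList.foldl (fun out ch => out ++ [PySem.Chars.lowerChar (pvLeetChar ch)]) [])

-- ===== PRECONDITION & SPEC =====
def Spec_leetspeak_normalize (text : String) (out : String) : Prop := out = leetspeak_normalize_alt text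
instance (text : String) (out : String) : Decidable (Spec_leetspeak_normalize text out) := by unfold Spec_leetspeak_normalize; infer_instance

-- ===== CLAIM =====
def Claim_equal_leetspeak_normalize : Prop := ∀ (text : String), Dom_leetspeak_normalize text → Spec_leetspeak_normalize text (leetspeak_normalize text)

-- ===== LEMMAS AND PROOFS =====

-- single-character replace is exactly a pointwise map
theorem replace_go_single (c r : Char) :
    ∀ (l : List Char) (fuel : Nat) (acc : List Char), l.length ≤ fuel →
      PySem.Chars.replace.go [c] [r] fuel l acc
        = acc.reverse ++ l.map (fun x => if x = c then r else x) := by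
  intro l
  induction l with
  | nil =>
    intro fuel acc _
    cases fuel <;> simp [PySem.Chars.replace.go]
  | cons x t ih =>
    intro fuel acc hlen
    cases fuel with
    | zero => simp at hlen
    | succ n =>
      by_cases hx : x = c
      · subst hx
        have : List.isPrefixOf [x] (x :: t) = true := by simp [List.isPrefixOf]
        simp only [PySem.Chars.replace.go, this, if_pos, List.length_cons, List.length_nil,
          List.drop_succ_cons, List.drop_zero, List.reverse_cons,
          List.reverse_nil, List.nil_append, List.singleton_append]
        rw [ih n (r :: acc) (by simpa using Nat.le_of_succ_le_succ hlen)]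
        simp
      · simp only [PySem.Chars.replace.go]
        rw [if_neg (by simp [List.isPrefixOf]; exact fun h => hx h.symm)]
        rw [ih n (x :: acc) (by simpa using Nat.le_of_succ_le_succ hlen)]
        simp [hx]

theorem replace_single (c r : Char) (l : List Char) :
    PySem.Chars.replace l [c] [r] = l.map (fun x => if x = c then r else x) := by
  simpa [PySem.Chars.replace] using replace_go_single c r l l.length [] le_rfl

-- proof-side helper: one single-char substitution as a function on characters
def pvSub (cr : Char × Char) (x : Char) : Char := if x = cr.1 then cr.2 else x

theorem replace_single' (cr : Char × Char) (l : List Char) :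
    PySem.Chars.replace l [cr.1] [cr.2] = l.map (pvSub cr) := by
  simpa [pvSub] using replace_single cr.1 cr.2 l

-- A's string-level fold equals a list-level fold of pointwise maps
theorem foldl_toList (ps : List (Char × Char)) :
    ∀ (t : String),
      (ps.foldl (fun t cr => PySem.Str.replace t (String.ofList [cr.1]) (String.ofList [cr.2])) t).toList
        = ps.foldl (fun l cr => l.map (pvSub cr)) t.toList := by
  induction ps with
  | nil => intro t; rfl
  | cons p ps ih =>
    intro t
    simp only [List.foldl_cons]
    rw [ih]
    simp [PySem.Str.replace, replace_single' p]

theorem foldl_map_nil (ps : List (Char × Char)) :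
    ps.foldl (fun l cr => l.map (pvSub cr)) ([] : List Char) = [] := by
  induction ps with
  | nil => rfl
  | cons p ps ih => simpa using ih

theorem foldl_map_cons (ps : List (Char × Char)) :
    ∀ (x : Char) (l : List Char),
      ps.foldl (fun l cr => l.map (pvSub cr)) (x :: l)
        = ps.foldl (fun a cr => pvSub cr a) x :: ps.foldl (fun l cr => l.map (pvSub cr)) l := by
  induction ps with
  | nil => intro x l; rfl
  | cons p ps ih => intro x l; simp only [List.foldl_cons, List.map_cons]; exact ih _ _

-- the 14 sequential substitutions agree pointwise with B's conditional helper
theorem chain_eq_leetChar (ch : Char) :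
    pvReplacements.foldl (fun a cr => pvSub cr a) ch = pvLeetChar ch := by
  by_cases h1 : ch = '@'; · subst h1; decide
  by_cases h2 : ch = '4'; · subst h2; decide
  by_cases h3 : ch = '1'; · subst h3; decide
  by_cases h4 : ch = '3'; · subst h4; decide
  by_cases h5 : ch = '0'; · subst h5; decide
  by_cases h6 : ch = '5'; · subst h6; decide
  by_cases h7 : ch = '7'; · subst h7; decide
  by_cases h8 : ch = '8'; · subst h8; decide
  by_cases h9 : ch = '6'; · subst h9; decide
  by_cases h10 : ch = '!'; · subst h10; decide
  by_cases h11 : ch = '$'; · subst h11; decide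
  by_cases h12 : ch = '2'; · subst h12; decide
  by_cases h13 : ch = '9'; · subst h13; decide
  by_cases h14 : ch = '|'; · subst h14; decide
  simp [pvReplacements, pvSub, pvLeetChar,
    h1, h2, h3, h4, h5, h6, h7, h8, h9, h10, h11, h12, h13, h14]

-- B's accumulator loop is the pointwise map of its body
theorem foldl_append_map (f : Char → Char) :
    ∀ (l acc : List Char),
      l.foldl (fun out ch => out ++ [f ch]) acc = acc ++ l.map f := by
  intro l
  induction l with
  | nil => intro acc; simp
  | cons x t ih => intro acc; simp [List.foldl_cons, ih]

-- ===== VERDICT =====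
theorem leetspeak_normalize_spec : Claim_equal_leetspeak_normalize := by
  intro text _
  unfold Spec_leetspeak_normalize leetspeak_normalize leetspeak_normalize_alt
  apply String.toList_inj.mp
  rw [String.toList_ofList, foldl_append_map, PySem.Str.toList_lower, foldl_toList]
  simp only [List.nil_append, PySem.Chars.lower]
  induction text.toList with
  | nil => simp [foldl_map_nil]
  | cons x t ih =>
    rw [foldl_map_cons]
    simp only [List.map_cons, ih, chain_eq_leetChar]
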